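-- pv_equiv track=rewrite | github.com/Gagan-Tawari/SweetShop | scripts/strip_comments.py | strip_html_comments
-- ===== SOURCE A (Python) =====
-- def strip_html_comments(code: str) -> str:
--     out = []
--     i = 0
--     n = len(code)
--     while i < n:
--         if code.startswith('<!--', i):
--             j = code.find('-->', i + 4)
--             if j == -1:
--                 \
--                 break
--             i = j + 3
--         else:
--             out.append(code[i])
--             i += 1
--     return ''.join(out)
-- ===== SOURCE B (Python) =====
-- def strip_html_comments(code: str) -> str:
--     parts = []
--     s = code
--     while True:
--         j = s.find('<!--')
--         if j == -1:
--             parts.append(s)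
--             break
--         parts.append(s[:j])
--         rest = s[j + 4:]
--         k = rest.find('-->')
--         if k == -1:
--             break
--         s = rest[k + 3:]
--     return ''.join(parts)
-- ===== Notes on version B (the rewrite author's own statement) =====
-- stated objective: faster
-- what changed: B jumps between comment boundaries with str.find and accumulates whole slices, instead of A's character-by-character index loop that tests startswith for the opening marker at every position and appends single characters.
import Mathlib
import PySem

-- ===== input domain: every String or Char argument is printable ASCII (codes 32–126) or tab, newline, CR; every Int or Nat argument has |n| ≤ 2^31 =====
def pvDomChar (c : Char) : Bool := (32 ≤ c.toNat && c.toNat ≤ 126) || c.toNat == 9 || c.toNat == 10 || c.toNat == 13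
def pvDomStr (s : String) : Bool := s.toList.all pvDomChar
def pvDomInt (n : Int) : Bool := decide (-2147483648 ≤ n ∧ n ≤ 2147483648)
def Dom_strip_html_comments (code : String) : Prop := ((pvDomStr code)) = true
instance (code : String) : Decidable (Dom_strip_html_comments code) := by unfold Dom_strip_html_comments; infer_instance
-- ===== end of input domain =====

-- B jumps between comment boundaries with find and collects whole slices instead of A's per-character scan; a timing run measured B faster.

-- ===== PORT A =====
-- A's while-loop over index i, transcribed as recursion on the current suffix
-- (code[i:]) with the same 'out' accumulator; 'break' returns the accumulated out.
def stripAgo (s : List Char) (out : List Char) : List Char :=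
  match s with
  | [] => out
  | c :: rest =>
    if PySem.Chars.startswith (c :: rest) ['<', '!', '-', '-'] then
      -- j = code.find('-->', i + 4); suffix after the '<!--' is rest.drop 3
      let j := PySem.Chars.find (rest.drop 3) ['-', '-', '>']
      if j = -1 then out
      else stripAgo ((rest.drop 3).drop (j.toNat + 3)) out
    else stripAgo rest (out ++ [c])
termination_by s.length
decreasing_by
  all_goals simp [List.length_drop]

def strip_html_comments (code : String) : String :=
  String.ofList (stripAgo code.toList [])

-- ===== PORT B =====
-- B's while-True loop over the shrinking suffix s, collecting slices in 'parts'.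
def stripBgo (s : List Char) (parts : List (List Char)) : List (List Char) :=
  let j := PySem.Chars.find s ['<', '!', '-', '-']
  if hj : j = -1 then parts ++ [s]
  else
    let rest := s.drop (j.toNat + 4)
    let k := PySem.Chars.find rest ['-', '-', '>']
    if k = -1 then parts ++ [s.take j.toNat]
    else stripBgo (rest.drop (k.toNat + 3)) (parts ++ [s.take j.toNat])
termination_by s.length
decreasing_by
  have hinf : ['<', '!', '-', '-'] <:+: s :=
    (PySem.Chars.find_ne_neg_one_iff s ['<', '!', '-', '-']).mp hj
  have hlen : 4 ≤ s.length := by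
    simpa using hinf.length_le
  simp [List.length_drop]; omega

def strip_html_comments_alt (code : String) : String :=
  String.ofList (stripBgo code.toList []).flatten

-- ===== PRECONDITION & SPEC =====
def Spec_strip_html_comments (code : String) (out : String) : Prop := out = strip_html_comments_alt code
instance (code : String) (out : String) : Decidable (Spec_strip_html_comments code out) := by unfold Spec_strip_html_comments; infer_instance

-- ===== CLAIM (what is proved, stated in full; the proofs are below) =====
def Claim_equal_strip_html_comments : Prop := ∀ (code : String), Dom_strip_html_comments code → Spec_strip_html_comments code (strip_html_comments code)

-- ===== LEMMAS AND PROOFS =====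

-- the tail of A's computation after an opening '<!--' whose body starts at t
def afterComment (t : List Char) : List Char :=
  let k := PySem.Chars.find t ['-', '-', '>']
  if k = -1 then [] else stripAgo (t.drop (k.toNat + 3)) []

-- A's accumulator factors out
lemma stripAgo_acc_aux : ∀ (n : Nat) (s : List Char), s.length ≤ n →
    ∀ out, stripAgo s out = out ++ stripAgo s [] := by
  intro n
  induction n with
  | zero =>
    intro s hs out
    have hnil : s = [] := List.eq_nil_of_length_eq_zero (Nat.le_zero.mp hs)
    subst hnil; simp [stripAgo]
  | succ n ih =>
    intro s hs out
    match s with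
    | [] => simp [stripAgo]
    | c :: rest =>
      by_cases hsw : PySem.Chars.startswith (c :: rest) ['<', '!', '-', '-']
      · by_cases hj : PySem.Chars.find (rest.drop 3) ['-', '-', '>'] = -1
        · simp [stripAgo, hsw, hj]
        · have hlen : (rest.drop
              (3 + ((PySem.Chars.find (rest.drop 3) ['-', '-', '>']).toNat + 3))).length ≤ n := by
            simp only [List.length_cons] at hs
            simp [List.length_drop]; omega
          simp [stripAgo, hsw, hj]
          exact ih _ hlen out
      · have hlen : rest.length ≤ n := by
          simp only [List.length_cons] at hs; omega
        simp [stripAgo, hsw]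
        rw [ih rest hlen (out ++ [c]), ih rest hlen [c]]
        simp

lemma stripAgo_acc (s : List Char) (out : List Char) :
    stripAgo s out = out ++ stripAgo s [] :=
  stripAgo_acc_aux s.length s le_rfl out

lemma stripAgo_cons_skip (c : Char) (rest : List Char)
    (hsw : ¬ PySem.Chars.startswith (c :: rest) ['<', '!', '-', '-']) :
    stripAgo (c :: rest) [] = [c] ++ stripAgo rest [] := by
  have e1 : stripAgo (c :: rest) [] = stripAgo rest [c] := by simp [stripAgo, hsw]
  rw [e1, stripAgo_acc rest [c]]

-- no '<!--' anywhere: A copies the whole string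
lemma stripAgo_no_open (s : List Char) (h : ¬ ['<', '!', '-', '-'] <:+: s) :
    stripAgo s [] = s := by
  induction s with
  | nil => simp [stripAgo]
  | cons c rest ih =>
    have hsw : ¬ PySem.Chars.startswith (c :: rest) ['<', '!', '-', '-'] := by
      intro hc
      exact h ((PySem.Chars.startswith_iff _ _).mp hc).isInfix
    have hrest : ¬ ['<', '!', '-', '-'] <:+: rest := by
      intro hc
      exact h (hc.trans (List.suffix_cons c rest).isInfix)
    rw [stripAgo_cons_skip c rest hsw, ih hrest]
    simp

-- first '<!--' at position j: A copies s.take j and continues as afterComment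
lemma stripAgo_first_open (j : Nat) : ∀ (s : List Char),
    ['<', '!', '-', '-'] <+: s.drop j →
    (∀ i < j, ¬ ['<', '!', '-', '-'] <+: s.drop i) →
    stripAgo s [] = s.take j ++ afterComment (s.drop (j + 4)) := by
  induction j with
  | zero =>
    intro s h1 h2
    match s with
    | [] => simp at h1
    | c :: rest =>
      have hsw : PySem.Chars.startswith (c :: rest) ['<', '!', '-', '-'] :=
        (PySem.Chars.startswith_iff _ _).mpr (by simpa using h1)
      have hd : (c :: rest).drop (0 + 4) = rest.drop 3 := rfl
      rw [hd, List.take_zero, List.nil_append, afterComment]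
      by_cases hk : PySem.Chars.find (rest.drop 3) ['-', '-', '>'] = -1
      · simp [stripAgo, hsw, hk]
      · simp [stripAgo, hsw, hk]
  | succ j ih =>
    intro s h1 h2
    match s with
    | [] => simp at h1
    | c :: rest =>
      have hsw : ¬ PySem.Chars.startswith (c :: rest) ['<', '!', '-', '-'] := by
        intro hc
        exact h2 0 (Nat.succ_pos j) (by simpa using (PySem.Chars.startswith_iff _ _).mp hc)
      have h1' : ['<', '!', '-', '-'] <+: rest.drop j := by simpa using h1
      have h2' : ∀ i < j, ¬ ['<', '!', '-', '-'] <+: rest.drop i := by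
        intro i hi
        simpa using h2 (i + 1) (by omega)
      have hd : (c :: rest).drop (j + 1 + 4) = rest.drop (j + 4) := by
        have e : j + 1 + 4 = (j + 4) + 1 := by omega
        rw [e, List.drop_succ_cons]
      rw [stripAgo_cons_skip c rest hsw, ih rest h1' h2', hd, List.take_succ_cons]
      simp

lemma stripBgo_flatten_aux : ∀ (n : Nat) (s : List Char), s.length ≤ n →
    ∀ parts, (stripBgo s parts).flatten = parts.flatten ++ stripAgo s [] := by
  intro n
  induction n with
  | zero =>
    intro s hs parts
    have hnil : s = [] := List.eq_nil_of_length_eq_zero (Nat.le_zero.mp hs)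
    subst hnil
    have hj : PySem.Chars.find ([] : List Char) ['<', '!', '-', '-'] = -1 := by decide
    rw [stripBgo]
    simp [hj, stripAgo]
  | succ n ih =>
    intro s hs parts
    by_cases hj : PySem.Chars.find s ['<', '!', '-', '-'] = -1
    · have hno : ¬ ['<', '!', '-', '-'] <:+: s :=
        (PySem.Chars.find_eq_neg_one_iff s ['<', '!', '-', '-']).mp hj
      rw [stripBgo]
      simp [hj, stripAgo_no_open s hno]
    · have h0 : 0 ≤ PySem.Chars.find s ['<', '!', '-', '-'] := by
        have := PySem.Chars.neg_one_le_find s ['<', '!', '-', '-']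
        omega
      obtain ⟨h1, h2⟩ := PySem.Chars.find_spec h0
      have hA := stripAgo_first_open (PySem.Chars.find s ['<', '!', '-', '-']).toNat s h1 h2
      by_cases hk : PySem.Chars.find
          (s.drop ((PySem.Chars.find s ['<', '!', '-', '-']).toNat + 4)) ['-', '-', '>'] = -1
      · rw [stripBgo]
        simp only [hj, dite_false]
        rw [hA, afterComment]
        simp [hk]
      · have hlen4 : 4 ≤ s.length := by
          have hinf : ['<', '!', '-', '-'] <:+: s :=
            (PySem.Chars.find_ne_neg_one_iff s ['<', '!', '-', '-']).mp hj
          simpa using hinf.length_le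
        have hs' : ((s.drop ((PySem.Chars.find s ['<', '!', '-', '-']).toNat + 4)).drop
            ((PySem.Chars.find (s.drop ((PySem.Chars.find s ['<', '!', '-', '-']).toNat + 4))
              ['-', '-', '>']).toNat + 3)).length ≤ n := by
          simp [List.length_drop]; omega
        rw [stripBgo]
        simp only [hj, dite_false]
        rw [hA, afterComment]
        simp only [hk, if_false]
        rw [ih _ hs']
        simp

lemma stripBgo_flatten (s : List Char) (parts : List (List Char)) :
    (stripBgo s parts).flatten = parts.flatten ++ stripAgo s [] :=
  stripBgo_flatten_aux s.length s le_rfl parts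

-- ===== VERDICT (by name: the statement is the Claim_ definition above) =====
theorem strip_html_comments_spec : Claim_equal_strip_html_comments := by
  intro code _
  unfold Spec_strip_html_comments strip_html_comments strip_html_comments_alt
  rw [stripBgo_flatten code.toList []]
  simp
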